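-- pv_equiv track=rewrite | github.com/PARK-se-ung/Algorithm | 백준/Silver/28804. Таинственный ритуал/Таинственный ритуал.py | func
-- ===== SOURCE A (Python) =====
-- def func(x):
--     if x in {1, 2, 5, 10}:
--         return 1
--     if x == 4:
--         return 2
--     if x in {3, 6}:
--         return 3
--     if x == 8:
--         return 4
--     if x > 10:
--         return func(1 + func(x % 10))
--     return x
-- ===== SOURCE B (Python) =====
-- _DIRECT = {1: 1, 2: 1, 3: 3, 4: 2, 5: 1, 6: 3, 8: 4, 10: 1}
-- _BIG = {0: 1, 1: 1, 2: 1, 3: 2, 4: 3, 5: 1, 6: 2, 7: 4, 8: 1, 9: 1}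
--
--
-- def func(x):
--     if x > 10:
--         return _BIG[x % 10]
--     return _DIRECT.get(x, x)
-- ===== Notes on version B (the rewrite author's own statement) =====
-- stated objective: simpler
-- what changed: Replaced the double recursion func(1 + func(x % 10)) and the if-chain by two precomputed flat lookup tables: one for the small inputs (falling back to x itself) and one keyed by the last digit for the large inputs, so B does a single O(1) lookup with no recursion.
import Mathlib
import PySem

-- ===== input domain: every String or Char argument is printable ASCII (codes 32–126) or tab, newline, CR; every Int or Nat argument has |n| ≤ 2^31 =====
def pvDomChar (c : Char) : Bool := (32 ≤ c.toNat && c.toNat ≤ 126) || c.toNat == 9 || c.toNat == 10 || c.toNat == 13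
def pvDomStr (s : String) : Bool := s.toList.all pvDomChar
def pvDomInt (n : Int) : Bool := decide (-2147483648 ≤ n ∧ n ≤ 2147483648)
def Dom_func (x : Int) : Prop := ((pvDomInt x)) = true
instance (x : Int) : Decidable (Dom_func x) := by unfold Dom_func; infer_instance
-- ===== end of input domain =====

-- B replaces A's double recursion by two precomputed flat lookup tables (objective: simpler).

-- ===== PORT A =====
-- A's recursion has depth ≤ 2 (for x > 10 both recursive arguments are ≤ 10, which
-- never recurse), so a fuel of 3 makes the literal transcription total; the fuel-0
-- branch is unreachable for any fuel ≥ 2.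
def funcGo : Nat → Int → Int
  | 0, x => x
  | fuel + 1, x =>
    if x = 1 ∨ x = 2 ∨ x = 5 ∨ x = 10 then 1
    else if x = 4 then 2
    else if x = 3 ∨ x = 6 then 3
    else if x = 8 then 4
    else if x > 10 then funcGo fuel (1 + funcGo fuel (PySem.Int.mod x 10))
    else x

def func (x : Int) : Int := funcGo 3 x

-- ===== PORT B =====
def directTable : PySem.Dict Int Int :=
  PySem.Dict.ofList [(1, 1), (2, 1), (3, 3), (4, 2), (5, 1), (6, 3), (8, 4), (10, 1)]

def bigTable : PySem.Dict Int Int :=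
  PySem.Dict.ofList [(0, 1), (1, 1), (2, 1), (3, 2), (4, 3), (5, 1), (6, 2), (7, 4), (8, 1), (9, 1)]

def func_alt (x : Int) : Int :=
  if x > 10 then
    -- _BIG[x % 10]: the key x % 10 ∈ [0, 10) is always present, so the KeyError
    -- branch (get? = none) is unreachable; 0 is a dead default.
    (PySem.Dict.get? bigTable (PySem.Int.mod x 10)).getD 0
  else
    PySem.Dict.getD directTable x x

-- ===== PRECONDITION & SPEC =====
def Spec_func (x : Int) (out : Int) : Prop := out = func_alt x
instance (x : Int) (out : Int) : Decidable (Spec_func x out) := by unfold Spec_func; infer_instance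

-- ===== CLAIM (what is proved, stated in full; the proofs are below) =====
def Claim_equal_func : Prop := ∀ (x : Int), Dom_func x → Spec_func x (func x)

-- ===== LEMMAS AND PROOFS =====

-- For x ≤ 10 both sides agree (unfold and split on the finitely many table keys).
theorem func_eq_alt_small (x : Int) (hx : x ≤ 10) : func x = func_alt x := by
  have hd : directTable =
      ((((((((PySem.Dict.empty.insert 1 1).insert 2 1).insert 3 3).insert 4 2).insert 5 1).insert
          6 3).insert 8 4).insert 10 1) := by rfl
  unfold func funcGo func_alt
  rw [hd]
  simp only [PySem.Dict.getD_insert, PySem.Dict.getD_empty]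
  split_ifs <;> omega

-- For x > 10 both sides agree: case on the ten possible values of x % 10.
theorem func_eq_alt_big (x : Int) (hx : x > 10) : func x = func_alt x := by
  have hm : PySem.Int.mod x 10 = x % 10 := PySem.Int.mod_eq_emod_of_pos (by norm_num)
  obtain ⟨hb1, hb2⟩ : 0 ≤ x % 10 ∧ x % 10 < 10 :=
    ⟨Int.emod_nonneg x (by norm_num), Int.emod_lt_of_pos x (by norm_num)⟩
  unfold func funcGo func_alt
  rw [if_neg (by omega), if_neg (by omega), if_neg (by omega), if_neg (by omega), if_pos hx,
      if_pos hx, hm]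
  generalize hr : x % 10 = r at hb1 hb2
  interval_cases r <;> decide

-- ===== VERDICT (by name: the statement is the Claim_ definition above) =====
theorem func_spec : Claim_equal_func := by
  intro x _
  unfold Spec_func
  by_cases h : x ≤ 10
  · exact func_eq_alt_small x h
  · exact func_eq_alt_big x (by omega)
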